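-- pv_equiv track=rewrite | github.com/Sefaria/ai-chatbot | evals/scorers/code_scorers/link_are_valid.py | _drop_prefix_urls
-- ===== SOURCE A (Python) =====
-- def _drop_prefix_urls(urls: list[str]) -> list[str]:
--     """
--     Remove extracted URLs that are strict prefixes of other extracted URLs.
--     This fixes broken HTML like href='...Cohen's...' which can yield both:
--       - ...Hermann_Cohen   (truncated)
--       - ...Hermann_Cohen's_Religion... (real)
--     """
--     out: list[str] = []
--     for u in urls:
--         is_prefix = False
--         for v in urls:
--             if u == v:
--                 continue
--             if v.startswith(u) and len(v) > len(u):
--                 nxt = v[len(u) : len(u) + 1]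
--                 if nxt in ("'", "%", "_", "-", ".", ":", ";", ","):
--                     is_prefix = True
--                     break
--         if not is_prefix:
--             out.append(u)
--     return out
-- ===== SOURCE B (Python) =====
-- _SPECIAL = {"'", "%", "_", "-", ".", ":", ";", ","}
--
-- def _drop_prefix_urls(urls: list[str]) -> list[str]:
--     # One pass collects every prefix of a URL that is followed by a qualifying
--     # special character; a second pass keeps the URLs not in that banned set.
--     banned = set()
--     for v in urls:
--         for i, c in enumerate(v):
--             if c in _SPECIAL:
--                 banned.add(v[:i])
--     return [u for u in urls if u not in banned]
-- ===== Notes on version B (the rewrite author's own statement) =====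
-- stated objective: faster
-- what changed: Instead of testing every pair of URLs for the prefix-plus-special-char relation, B makes one pass collecting into a hash set every prefix that is immediately followed by a special character, then keeps the URLs not in that set.
import Mathlib
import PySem

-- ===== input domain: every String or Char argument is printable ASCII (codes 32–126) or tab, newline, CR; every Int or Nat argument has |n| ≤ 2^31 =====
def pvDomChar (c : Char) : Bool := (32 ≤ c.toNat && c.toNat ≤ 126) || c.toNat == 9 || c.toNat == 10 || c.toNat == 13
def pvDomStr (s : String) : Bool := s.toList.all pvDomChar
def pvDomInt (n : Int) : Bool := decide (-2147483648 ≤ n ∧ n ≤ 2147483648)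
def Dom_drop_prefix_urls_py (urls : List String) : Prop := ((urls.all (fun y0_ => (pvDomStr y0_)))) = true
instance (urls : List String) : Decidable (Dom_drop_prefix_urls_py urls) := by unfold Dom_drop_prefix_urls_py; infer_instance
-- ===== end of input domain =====

-- B replaces A's all-pairs prefix test by one pass that collects, into a hash set, every
-- prefix immediately followed by a qualifying special character (objective: faster, asymptotic).

-- ===== PORT A =====
-- the tuple ("'", "%", "_", "-", ".", ":", ";", ",") of one-char strings
def pvSpecials : List String := ["'", "%", "_", "-", ".", ":", ";", ","]

-- A's inner 'for v in urls' loop for a fixed u: the value of is_prefix after the loop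
def pvIsPrefixA (u : String) : List String → Bool
  | [] => false
  | v :: rest =>
    if u = v then pvIsPrefixA u rest
    else if PySem.Str.startswith v u && decide (PySem.Str.len v > PySem.Str.len u) then
      if pvSpecials.contains
          (PySem.Str.slice v (some (PySem.Str.len u)) (some (PySem.Str.len u + 1))) then
        true
      else pvIsPrefixA u rest
    else pvIsPrefixA u rest

def drop_prefix_urls_py (urls : List String) : List String :=
  urls.foldl (fun out u => if pvIsPrefixA u urls then out else out ++ [u]) []

-- ===== PORT B =====
-- the set _SPECIAL (Python one-char strings; code points here)
def pvSpecialChars : List Char := ['\'', '%', '_', '-', '.', ':', ';', ',']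

-- for v in urls: for i, c in enumerate(v): if c in _SPECIAL: banned.add(v[:i])
def pvBanned (urls : List String) : PySem.Set String :=
  urls.foldl
    (fun banned v =>
      (PySem.List.enumerate v.toList).foldl
        (fun b ic =>
          if pvSpecialChars.contains ic.2 then b.add (PySem.Str.slice v none (some ic.1)) else b)
        banned)
    (PySem.Set.ofList [])

def drop_prefix_urls_py_alt (urls : List String) : List String :=
  let banned := pvBanned urls
  urls.filter (fun u => !(banned.contains u))

-- ===== PRECONDITION & SPEC =====
def Spec_drop_prefix_urls_py (urls : List String) (out : List String) : Prop := out = drop_prefix_urls_py_alt urls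
instance (urls : List String) (out : List String) : Decidable (Spec_drop_prefix_urls_py urls out) := by unfold Spec_drop_prefix_urls_py; infer_instance

-- ===== CLAIM (what is proved, stated in full; the proofs are below) =====
def Claim_equal_drop_prefix_urls_py : Prop := ∀ (urls : List String), Dom_drop_prefix_urls_py urls → Spec_drop_prefix_urls_py urls (drop_prefix_urls_py urls)

-- ===== LEMMAS AND PROOFS =====

-- A's inner loop returns true iff some v in the list qualifies
theorem pvIsPrefixA_iff (u : String) (vs : List String) :
    pvIsPrefixA u vs = true ↔
      ∃ v ∈ vs, u ≠ v ∧
        (PySem.Str.startswith v u && decide (PySem.Str.len v > PySem.Str.len u)) = true ∧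
        pvSpecials.contains
          (PySem.Str.slice v (some (PySem.Str.len u)) (some (PySem.Str.len u + 1))) = true := by
  induction vs with
  | nil => simp [pvIsPrefixA]
  | cons v rest ih =>
    simp only [pvIsPrefixA]
    split_ifs with h1 h2 h3
    · rw [ih]
      constructor
      · rintro ⟨w, hw, hne, hc⟩; exact ⟨w, List.mem_cons_of_mem _ hw, hne, hc⟩
      · rintro ⟨w, hw, hne, hc⟩
        rcases List.mem_cons.mp hw with rfl | hw
        · exact absurd h1 hne
        · exact ⟨w, hw, hne, hc⟩
    · simp only [true_iff]
      exact ⟨v, List.mem_cons_self .., h1, h2, h3⟩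
    · rw [ih]
      constructor
      · rintro ⟨w, hw, hne, hc⟩; exact ⟨w, List.mem_cons_of_mem _ hw, hne, hc⟩
      · rintro ⟨w, hw, hne, hs, hc⟩
        rcases List.mem_cons.mp hw with rfl | hw
        · exact absurd hc h3
        · exact ⟨w, hw, hne, hs, hc⟩
    · rw [ih]
      constructor
      · rintro ⟨w, hw, hne, hc⟩; exact ⟨w, List.mem_cons_of_mem _ hw, hne, hc⟩
      · rintro ⟨w, hw, hne, hs, hc⟩
        rcases List.mem_cons.mp hw with rfl | hw
        · exact absurd hs h2
        · exact ⟨w, hw, hne, hs, hc⟩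

-- membership in B's inner fold over one URL v
theorem pvMemInner (v : String) (l : List (Int × Char)) (b0 : PySem.Set String) (u : String) :
    u ∈ l.foldl
        (fun b ic =>
          if pvSpecialChars.contains ic.2 then b.add (PySem.Str.slice v none (some ic.1)) else b)
        b0 ↔
      u ∈ b0 ∨ ∃ ic ∈ l, pvSpecialChars.contains ic.2 = true ∧
        PySem.Str.slice v none (some ic.1) = u := by
  induction l generalizing b0 with
  | nil => simp
  | cons p l ih =>
    simp only [List.foldl_cons]
    split_ifs with hp
    · rw [ih, PySem.Set.mem_add]
      constructor
      · rintro (⟨h | rfl⟩ | ⟨ic, hic, hc⟩)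
        · exact Or.inl h
        · exact Or.inr ⟨p, List.mem_cons_self .., hp, rfl⟩
        · exact Or.inr ⟨ic, List.mem_cons_of_mem _ hic, hc⟩
      · rintro (h | ⟨ic, hic, hc, he⟩)
        · exact Or.inl (Or.inl h)
        · rcases List.mem_cons.mp hic with rfl | hic
          · exact Or.inl (Or.inr he.symm)
          · exact Or.inr ⟨ic, hic, hc, he⟩
    · rw [ih]
      constructor
      · rintro (h | ⟨ic, hic, hc⟩)
        · exact Or.inl h
        · exact Or.inr ⟨ic, List.mem_cons_of_mem _ hic, hc⟩
      · rintro (h | ⟨ic, hic, hc, he⟩)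
        · exact Or.inl h
        · rcases List.mem_cons.mp hic with rfl | hic
          · exact absurd hc hp
          · exact Or.inr ⟨ic, hic, hc, he⟩

-- membership in B's banned set
theorem pvMemBanned_aux (urls : List String) (b0 : PySem.Set String) (u : String) :
    u ∈ urls.foldl
        (fun banned v =>
          (PySem.List.enumerate v.toList).foldl
            (fun b ic =>
              if pvSpecialChars.contains ic.2 then b.add (PySem.Str.slice v none (some ic.1))
              else b)
            banned)
        b0 ↔
      u ∈ b0 ∨ ∃ v ∈ urls, ∃ ic ∈ PySem.List.enumerate v.toList,
        pvSpecialChars.contains ic.2 = true ∧ PySem.Str.slice v none (some ic.1) = u := by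
  induction urls generalizing b0 with
  | nil => simp
  | cons v rest ih =>
    simp only [List.foldl_cons]
    rw [ih]
    constructor
    · rintro (h | ⟨w, hw, hic⟩)
      · rcases (pvMemInner v _ b0 u).mp h with h | ⟨ic, hic, hc⟩
        · exact Or.inl h
        · exact Or.inr ⟨v, List.mem_cons_self .., ic, hic, hc⟩
      · exact Or.inr ⟨w, List.mem_cons_of_mem _ hw, hic⟩
    · rintro (h | ⟨w, hw, ic, hic, hc, he⟩)
      · exact Or.inl ((pvMemInner v _ b0 u).mpr (Or.inl h))
      · rcases List.mem_cons.mp hw with rfl | hw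
        · exact Or.inl ((pvMemInner w _ b0 u).mpr (Or.inr ⟨ic, hic, hc, he⟩))
        · exact Or.inr ⟨w, hw, ic, hic, hc, he⟩

theorem pvMemBanned (urls : List String) (u : String) :
    u ∈ pvBanned urls ↔
      ∃ v ∈ urls, ∃ ic ∈ PySem.List.enumerate v.toList,
        pvSpecialChars.contains ic.2 = true ∧ PySem.Str.slice v none (some ic.1) = u := by
  rw [pvBanned, pvMemBanned_aux]
  simp

-- A's one-char-string membership test, read on code points
theorem pvSpecials_contains_iff (s : String) :
    pvSpecials.contains s = true ↔
      ∃ c, pvSpecialChars.contains c = true ∧ s.toList = [c] := by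
  constructor
  · intro h
    rcases List.contains_iff_mem.mp h with h
    simp only [pvSpecials, List.mem_cons, List.not_mem_nil, or_false] at h
    rcases h with rfl | rfl | rfl | rfl | rfl | rfl | rfl | rfl
    · exact ⟨'\'', by decide, by decide⟩
    · exact ⟨'%', by decide, by decide⟩
    · exact ⟨'_', by decide, by decide⟩
    · exact ⟨'-', by decide, by decide⟩
    · exact ⟨'.', by decide, by decide⟩
    · exact ⟨':', by decide, by decide⟩
    · exact ⟨';', by decide, by decide⟩
    · exact ⟨',', by decide, by decide⟩
  · rintro ⟨c, hc, hs⟩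
    have hsc : s = String.ofList [c] := by
      rw [← String.toList_inj, hs]; simp
    subst hsc
    simp only [pvSpecialChars, List.contains_iff_mem, List.mem_cons, List.not_mem_nil,
      or_false] at hc
    apply List.contains_iff_mem.mpr
    rcases hc with rfl | rfl | rfl | rfl | rfl | rfl | rfl | rfl <;> decide

-- the crux: A's per-pair condition ↔ B's per-occurrence condition
theorem pvCrux (u v : String) :
    (u ≠ v ∧
      (PySem.Str.startswith v u && decide (PySem.Str.len v > PySem.Str.len u)) = true ∧
      pvSpecials.contains
        (PySem.Str.slice v (some (PySem.Str.len u)) (some (PySem.Str.len u + 1))) = true) ↔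
    ∃ ic ∈ PySem.List.enumerate v.toList,
      pvSpecialChars.contains ic.2 = true ∧ PySem.Str.slice v none (some ic.1) = u := by
  set us := u.toList with hus
  set cs := v.toList with hcs
  have hne_len : ∀ {n : ℕ}, n < cs.length → us = cs.take n → us.length = n := by
    intro n hn h
    rw [h, List.length_take]; omega
  constructor
  · rintro ⟨hne, hsw, hct⟩
    rw [Bool.and_eq_true, decide_eq_true_eq] at hsw
    obtain ⟨hstarts, hlen⟩ := hsw
    rw [PySem.Str.startswith_eq, PySem.Chars.startswith_iff] at hstarts
    rw [PySem.Str.len_eq, PySem.Str.len_eq] at hlen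
    have hlt : us.length < cs.length := by exact_mod_cast hlen
    rcases (pvSpecials_contains_iff _).mp hct with ⟨c, hc, hslc⟩
    rw [PySem.Str.toList_slice, PySem.Chars.slice_eq_listSlice] at hslc
    rw [PySem.Str.len_eq] at hslc
    have : PySem.List.slice cs (some (us.length : Int)) (some ((us.length : Int) + 1)) =
        List.take 1 (List.drop us.length cs) := by
      exact_mod_cast PySem.List.slice_natCast_add cs us.length 1
    rw [this] at hslc
    have hdrop : List.take 1 (List.drop us.length cs) = [cs[us.length]] := by
      rw [List.take_one_drop_eq_of_lt_length hlt]
      rfl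
    rw [hdrop] at hslc
    obtain rfl : c = cs[us.length] := by injection hslc.symm
    refine ⟨((us.length : Int), cs[us.length]), ?_, hc, ?_⟩
    · rw [PySem.List.mem_enumerate_iff]
      exact ⟨us.length, hlt, by simp⟩
    · rw [← String.toList_inj, PySem.Str.toList_slice, PySem.Chars.slice_eq_listSlice,
        PySem.List.slice_to_natCast, ← hus]
      exact (List.prefix_iff_eq_take.mp hstarts).symm
  · rintro ⟨ic, hic, hc, he⟩
    rw [PySem.List.mem_enumerate_iff] at hic
    obtain ⟨k, hk, rfl⟩ := hic
    rw [← String.toList_inj, PySem.Str.toList_slice, PySem.Chars.slice_eq_listSlice] at he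
    simp only [zero_add] at he
    rw [PySem.List.slice_to_natCast] at he
    have hlenu : us.length = k := hne_len hk he.symm
    refine ⟨?_, ?_, ?_⟩
    · intro h
      have hlc : us = cs := by rw [hus, hcs, h]
      have : us.length = cs.length := by rw [hlc]
      omega
    · rw [Bool.and_eq_true, decide_eq_true_eq]
      refine ⟨?_, ?_⟩
      · rw [PySem.Str.startswith_eq, PySem.Chars.startswith_iff, ← he]
        exact List.take_prefix k v.toList
      · rw [PySem.Str.len_eq, PySem.Str.len_eq, ← hus, ← hcs]
        exact_mod_cast hlenu ▸ hk
    · apply (pvSpecials_contains_iff _).mpr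
      refine ⟨cs[k], hc, ?_⟩
      rw [PySem.Str.toList_slice, PySem.Chars.slice_eq_listSlice, PySem.Str.len_eq,
        ← hus, hlenu, ← hcs]
      have hs1 : PySem.List.slice cs (some (k : Int)) (some ((k : Int) + 1)) =
          List.take 1 (List.drop k cs) := by
        exact_mod_cast PySem.List.slice_natCast_add cs k 1
      rw [hs1, List.take_one_drop_eq_of_lt_length hk]
      rfl

-- the per-URL predicates agree
theorem pvPred_eq (urls : List String) (u : String) :
    pvIsPrefixA u urls = (pvBanned urls).contains u := by
  rcases hbc : (pvBanned urls).contains u with _ | _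
  · rw [Bool.eq_false_iff]
    intro hA
    rcases (pvIsPrefixA_iff u urls).mp hA with ⟨v, hv, hcond⟩
    have : u ∈ pvBanned urls :=
      (pvMemBanned urls u).mpr ⟨v, hv, (pvCrux u v).mp hcond⟩
    rw [← PySem.Set.contains_iff] at this
    rw [hbc] at this
    cases this
  · have := (PySem.Set.contains_iff (pvBanned urls) u).mp hbc
    rcases (pvMemBanned urls u).mp this with ⟨v, hv, hoc⟩
    exact (pvIsPrefixA_iff u urls).mpr ⟨v, hv, (pvCrux u v).mpr hoc⟩

-- A's output-building fold is a filter
theorem pvFoldA (urls l : List String) :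
    l.foldl (fun out u => if pvIsPrefixA u urls then out else out ++ [u]) [] =
      l.filter (fun u => !pvIsPrefixA u urls) := by
  have hfun : (fun (out : List String) u => if pvIsPrefixA u urls then out else out ++ [u]) =
      fun out u => if (fun u => !pvIsPrefixA u urls) u then out ++ [(fun x => x) u] else out := by
    funext out u; rcases h : pvIsPrefixA u urls <;> simp [h]
  rw [hfun, PySem.List.foldl_append_if]
  simp

-- ===== VERDICT (by name: the statement is the Claim_ definition above) =====
theorem drop_prefix_urls_py_spec : Claim_equal_drop_prefix_urls_py := by
  intro urls _
  unfold Spec_drop_prefix_urls_py drop_prefix_urls_py drop_prefix_urls_py_alt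
  rw [pvFoldA]
  exact List.filter_congr fun u _ => by rw [pvPred_eq]
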